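-- pv_equiv track=rewrite | github.com/pwmcclung/newCodeProbs | min_turns.py | forwards
-- ===== SOURCE A (Python) =====
-- def forwards(x,y):
--     arr1 = [0,1,2,3,4,5,6,7,8,9]
--     arr2 = [0,1,2,3,4,5,6,7,8,9]
--     count1 = 0
--     while arr1.index(x) != arr2.index(y):
--         first = arr1.pop(0)
--         arr1.append(first)
--         count1 += 1
--     return count1
-- ===== SOURCE B (Python) =====
-- def forwards(x, y):
--     return (x - y) % 10
-- ===== Notes on version B (the rewrite author's own statement) =====
-- stated objective: simpler
-- what changed: Replaces the list-rotation loop with the closed form (x - y) % 10: rotating arr1 left k times puts x's index at (x - k) mod 10, so the loop count equals (x - y) mod 10.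
import Mathlib
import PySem

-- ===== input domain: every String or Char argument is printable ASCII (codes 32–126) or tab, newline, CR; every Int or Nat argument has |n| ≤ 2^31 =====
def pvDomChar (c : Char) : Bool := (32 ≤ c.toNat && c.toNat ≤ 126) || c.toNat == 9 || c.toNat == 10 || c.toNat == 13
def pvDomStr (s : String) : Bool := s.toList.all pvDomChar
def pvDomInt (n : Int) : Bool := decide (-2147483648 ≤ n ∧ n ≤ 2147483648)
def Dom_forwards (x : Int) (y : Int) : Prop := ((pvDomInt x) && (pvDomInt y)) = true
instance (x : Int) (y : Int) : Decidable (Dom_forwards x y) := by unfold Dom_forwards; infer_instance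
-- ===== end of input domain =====

-- B replaces A's rotate-and-recheck loop with the closed form (x - y) % 10 (objective: simpler).

-- ===== PORT A =====
-- the while loop: rotate arr1 left and count until arr1.index(x) == arr2.index(y).
-- Inside Pre_ the loop runs at most 9 times; fuel 10 suffices (fuel exhaustion is unreachable there).
def forwardsLoop (x : Int) (y : Int) : Nat → List Int → List Int → Int → Int
  | 0, _, _, count1 => count1
  | Nat.succ fuel, arr1, arr2, count1 =>
    if PySem.List.index? arr1 x = PySem.List.index? arr2 y then count1
    else match arr1 with
      | [] => count1          -- unreachable: arr1 is always a permutation of the 10 digits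
      | first :: rest => forwardsLoop x y fuel (rest ++ [first]) arr2 (count1 + 1)

def forwards (x : Int) (y : Int) : Int :=
  forwardsLoop x y 10 [0,1,2,3,4,5,6,7,8,9] [0,1,2,3,4,5,6,7,8,9] 0

-- ===== PORT B =====
def forwards_alt (x : Int) (y : Int) : Int := PySem.Int.mod (x - y) 10

-- ===== PRECONDITION & SPEC =====
-- A raises ValueError (list.index) unless both x and y are one of the digits 0..9.
def Pre_forwards (x : Int) (y : Int) : Prop := 0 ≤ x ∧ x ≤ 9 ∧ 0 ≤ y ∧ y ≤ 9
instance (x : Int) (y : Int) : Decidable (Pre_forwards x y) := by unfold Pre_forwards; infer_instance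
def pvWitness_forwards : Int × Int := (3, 7)
def Spec_forwards (x : Int) (y : Int) (out : Int) : Prop := out = forwards_alt x y
instance (x : Int) (y : Int) (out : Int) : Decidable (Spec_forwards x y out) := by unfold Spec_forwards; infer_instance

-- ===== CLAIM (what is proved, stated in full; the proofs are below) =====
def Claim_equal_forwards : Prop := ∀ (x : Int) (y : Int), Dom_forwards x y → Pre_forwards x y → Spec_forwards x y (forwards x y)

-- ===== LEMMAS AND PROOFS =====

-- ===== VERDICT (by name: the statement is the Claim_ definition above) =====
theorem forwards_spec : Claim_equal_forwards := by
  intro x y _ pre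
  obtain ⟨hx0, hx9, hy0, hy9⟩ := pre
  unfold Spec_forwards
  interval_cases x <;> interval_cases y <;> decide
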